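-- pv_equiv track=rewrite | github.com/Breno-de-Angelo/embedded-drum-synth | scripts/modify_sample_rate.py | resample_data
-- ===== SOURCE A (Python) =====
-- def resample_data(data):
--     """
--     Reamostra dados de áudio de 44.1kHz para 22.05kHz (razão 2:1).
--     Pega dois pares de amostras estéreo (L0, R0, L1, R1) e calcula a média
--     para produzir um novo par (L_new, R_new). Isso reduz o aliasing.
--     """
--     resampled = []
--     # Itera sobre os dados de 4 em 4 (dois pares estéreo de cada vez)
--     for i in range(0, len(data) - 3, 4):
--         l0, r0 = data[i], data[i+1]
--         l1, r1 = data[i+2], data[i+3]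
--
--         # Calcula a média para cada canal
--         new_l = (l0 + l1) // 2
--         new_r = (r0 + r1) // 2
--
--         resampled.extend([new_l, new_r])
--
--     return resampled
-- ===== SOURCE B (Python) =====
-- def resample_data(data):
--     """Staged version: (1) deinterleave into L/R channels with extended slices,
--     (2) pairwise-average each channel by zipping its even- and odd-position
--     slices, (3) re-interleave the two averaged channels (zip truncates, which
--     drops any trailing incomplete group exactly like A)."""
--     L = data[0::2]
--     R = data[1::2]
--     avgL = [(a + b) // 2 for a, b in zip(L[0::2], L[1::2])]
--     avgR = [(a + b) // 2 for a, b in zip(R[0::2], R[1::2])]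
--     out = []
--     for pair in zip(avgL, avgR):
--         out.extend(pair)
--     return out
-- ===== Notes on version B (the rewrite author's own statement) =====
-- stated objective: alternative
-- what changed: Replaces A's single interleaved pass reading 4 raw samples per index step with staged passes: deinterleave into L/R channels by extended slices, pairwise-average each channel by zipping its even/odd slices, then re-interleave the averaged channels (zip truncation drops trailing incomplete groups identically).
import Mathlib
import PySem

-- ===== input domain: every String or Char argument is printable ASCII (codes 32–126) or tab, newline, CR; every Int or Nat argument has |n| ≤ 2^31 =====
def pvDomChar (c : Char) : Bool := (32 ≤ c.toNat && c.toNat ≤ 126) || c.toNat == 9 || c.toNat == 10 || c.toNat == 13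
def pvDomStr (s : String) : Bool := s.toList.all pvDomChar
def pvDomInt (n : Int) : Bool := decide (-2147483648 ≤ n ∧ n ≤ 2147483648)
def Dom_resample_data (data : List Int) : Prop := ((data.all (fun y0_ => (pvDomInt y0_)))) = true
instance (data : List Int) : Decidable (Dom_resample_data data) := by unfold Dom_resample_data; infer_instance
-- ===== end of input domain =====

-- B restructures A's single interleaved 4-samples-per-step pass into staged passes:
-- deinterleave into L/R channels by slices, pairwise-average each channel from its
-- even/odd slices, then re-interleave (same O(n) cost; 'alternative' objective).

-- ===== PORT A =====
-- Literal port of A: for i in range(0, len(data)-3, 4), read data[i..i+3], append the two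
-- averages. Every index i..i+3 produced by the range is in bounds, so pyGetD's default 0 is
-- never used (the port is exact).
def resample_data (data : List Int) : List Int :=
  (PySem.List.pyRange 0 ((data.length : Int) - 3) 4).foldl
    (fun resampled i =>
      let l0 := PySem.List.pyGetD data i 0
      let r0 := PySem.List.pyGetD data (i + 1) 0
      let l1 := PySem.List.pyGetD data (i + 2) 0
      let r1 := PySem.List.pyGetD data (i + 3) 0
      resampled ++ [PySem.Int.floordiv (l0 + l1) 2, PySem.Int.floordiv (r0 + r1) 2])
    []

-- ===== PORT B =====
-- Port of B. Extended slices xs[a::2] are PySem.List.slice? with step 2; step ≠ 0 means the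
-- slice is always some, so '.getD []' only strips the impossible none (exact). zip-of-slices
-- comprehensions become List.zip + List.map; the extend loop is a foldl over the zipped pairs.
def resample_data_alt (data : List Int) : List Int :=
  let L := (PySem.List.slice? data (some 0) none 2).getD []
  let R := (PySem.List.slice? data (some 1) none 2).getD []
  let avgL := (List.zip ((PySem.List.slice? L (some 0) none 2).getD [])
                        ((PySem.List.slice? L (some 1) none 2).getD [])).map
                (fun p => PySem.Int.floordiv (p.1 + p.2) 2)
  let avgR := (List.zip ((PySem.List.slice? R (some 0) none 2).getD [])
                        ((PySem.List.slice? R (some 1) none 2).getD [])).map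
                (fun p => PySem.Int.floordiv (p.1 + p.2) 2)
  (List.zip avgL avgR).foldl (fun out p => out ++ [p.1, p.2]) []

-- ===== PRECONDITION & SPEC =====
def Spec_resample_data (data : List Int) (out : List Int) : Prop := out = resample_data_alt data
instance (data : List Int) (out : List Int) : Decidable (Spec_resample_data data out) := by unfold Spec_resample_data; infer_instance

-- ===== CLAIM =====
def Claim_equal_resample_data : Prop := ∀ (data : List Int), Dom_resample_data data → Spec_resample_data data (resample_data data)

-- ===== LEMMAS AND PROOFS =====

-- every-other-element (what a step-2 slice from 0 extracts)
def pvEo : List Int → List Int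
  | [] => []
  | [a] => [a]
  | a :: _ :: t => a :: pvEo t

theorem pvEo_cons (a : Int) (l : List Int) : pvEo (a :: l) = a :: pvEo l.tail := by
  cases l <;> rfl

-- step-2 slice from 0 in filterMap/range form equals pvEo
theorem pvFilterMap_two (xs : List Int) :
    (List.range ((xs.length + 1) / 2)).filterMap (fun k => xs[2 * k]?) = pvEo xs := by
  fun_induction pvEo xs with
  | case1 => simp
  | case2 a => simp
  | case3 a b t ih =>
    have hc : ((a :: b :: t).length + 1) / 2 = (t.length + 1) / 2 + 1 := by
      simp only [List.length_cons]; omega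
    rw [hc, List.range_succ_eq_map, List.filterMap_cons, List.filterMap_map]
    have hf : ((fun k => (a :: b :: t)[2 * k]?) ∘ Nat.succ) = (fun k => t[2 * k]?) := by
      funext k
      have h2 : 2 * Nat.succ k = (2 * k + 1) + 1 := by omega
      simp [h2]
    simp only [Nat.mul_zero, List.getElem?_cons_zero, hf, ih]

theorem pvSlice2_zero (xs : List Int) :
    PySem.List.slice? xs (some 0) none (2 : Int) = some (pvEo xs) := by
  simp only [PySem.List.slice?, PySem.List.sliceIndices]
  norm_num
  have hcount : (if 0 < xs.length then ((((xs.length : Int)) + 2 - 1) / 2).toNat else 0)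
      = (xs.length + 1) / 2 := by split_ifs with h <;> omega
  rw [hcount]
  rw [← pvFilterMap_two xs]
  apply List.filterMap_congr
  intro k _
  have : ((2 : Int) * (k : Int)).toNat = 2 * k := by omega
  rw [this]

theorem pvSlice2_one (xs : List Int) :
    PySem.List.slice? xs (some 1) none (2 : Int) = some (pvEo xs.tail) := by
  cases xs with
  | nil => rfl
  | cons a t =>
    simp only [PySem.List.slice?, PySem.List.sliceIndices]
    norm_num
    have hcount : (if 0 < t.length then ((((t.length : Int)) + 2 - 1) / 2).toNat else 0)
        = (t.length + 1) / 2 := by split_ifs with h <;> omega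
    rw [hcount, ← pvFilterMap_two t]
    apply List.filterMap_congr
    intro k _
    have h1 : ((1 : Int) + 2 * (k : Int)).toNat = (2 * k) + 1 := by omega
    simp [h1]

-- interleaved-pairs core of B, with the slices replaced by pvEo
def pvAvg (ch : List Int) : List Int :=
  (List.zip (pvEo ch) (pvEo ch.tail)).map (fun p => PySem.Int.floordiv (p.1 + p.2) 2)

def pvCore (xs : List Int) : List Int :=
  (List.zip (pvAvg (pvEo xs)) (pvAvg (pvEo xs.tail))).flatMap (fun p => [p.1, p.2])

theorem pvB_eq_core (data : List Int) : resample_data_alt data = pvCore data := by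
  unfold resample_data_alt pvCore pvAvg
  rw [pvSlice2_zero data, pvSlice2_one data]
  simp only [Option.getD_some]
  rw [pvSlice2_zero, pvSlice2_one, pvSlice2_zero, pvSlice2_one]
  simp only [Option.getD_some]
  exact (PySem.List.foldl_append_eq_flatMap _ _ _).trans (List.nil_append _)

-- the 4-at-a-time recursion both programs compute
def pvRec4 : List Int → List Int
  | l0 :: r0 :: l1 :: r1 :: rest =>
      PySem.Int.floordiv (l0 + l1) 2 :: PySem.Int.floordiv (r0 + r1) 2 :: pvRec4 rest
  | _ => []

theorem pvCore_eq_rec4 (xs : List Int) : pvCore xs = pvRec4 xs := by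
  fun_induction pvRec4 xs with
  | case1 l0 r0 l1 r1 rest ih =>
    rw [← ih]
    simp only [pvCore, pvAvg, pvEo_cons, List.tail_cons, List.zip_cons_cons, List.map_cons,
      List.flatMap_cons]
    rfl
  | case2 x hx =>
    rcases x with _ | ⟨a, _ | ⟨b, _ | ⟨c, _ | ⟨d, t⟩⟩⟩⟩
    · rfl
    · rfl
    · rfl
    · simp [pvCore, pvAvg, pvEo_cons, pvEo]
    · exact (hx a b c d t rfl).elim

-- common normal form for A: one group of output per k < len/4, reading positions 4k..4k+3
def pvGroup (data : List Int) (k : Nat) : List Int :=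
  [PySem.Int.floordiv (data.getD (4 * k) 0 + data.getD (4 * k + 2) 0) 2,
   PySem.Int.floordiv (data.getD (4 * k + 1) 0 + data.getD (4 * k + 3) 0) 2]

def pvGroups (data : List Int) : List Int :=
  (List.range (data.length / 4)).flatMap (pvGroup data)

theorem pvGroup_shift (a b c d : Int) (l : List Int) (k : Nat) :
    pvGroup (a :: b :: c :: d :: l) (k + 1) = pvGroup l k := by
  have h4 : 4 * (k + 1) = 4 * k + 4 := by omega
  have h1 : 4 * (k + 1) + 1 = (4 * k + 1) + 4 := by omega
  have h2 : 4 * (k + 1) + 2 = (4 * k + 2) + 4 := by omega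
  have h3 : 4 * (k + 1) + 3 = (4 * k + 3) + 4 := by omega
  simp only [pvGroup, h4]
  rfl

theorem pvA_eq_groups (data : List Int) : resample_data data = pvGroups data := by
  unfold resample_data pvGroups
  rw [PySem.List.pyRange_of_pos 0 ((data.length : Int) - 3) (by norm_num)]
  have hM : (if (0:Int) < (data.length : Int) - 3
      then (((data.length : Int) - 3 - 0 + 4 - 1) / 4).toNat else 0) = data.length / 4 := by
    split_ifs with h <;> omega
  rw [hM, List.foldl_map]
  refine (PySem.List.foldl_congr_mem _ _ (fun acc k => acc ++ pvGroup data k) _ ?_).trans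
    ((PySem.List.foldl_append_eq_flatMap _ _ _).trans (List.nil_append _))
  intro acc k _
  dsimp only
  have e0 : (0:Int) + 4 * (k:Int) = ((4 * k : Nat) : Int) := by push_cast; ring
  have e1 : ((4 * k : Nat) : Int) + 1 = ((4 * k + 1 : Nat) : Int) := by push_cast; ring
  have e2 : ((4 * k : Nat) : Int) + 2 = ((4 * k + 2 : Nat) : Int) := by push_cast; ring
  have e3 : ((4 * k : Nat) : Int) + 3 = ((4 * k + 3 : Nat) : Int) := by push_cast; ring
  simp only [e0, e1, e2, e3, PySem.List.pyGetD_natCast, pvGroup]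

theorem pvRec4_eq_groups (data : List Int) : pvRec4 data = pvGroups data := by
  fun_induction pvRec4 data with
  | case1 l0 r0 l1 r1 rest ih =>
    have hlen : (l0 :: r0 :: l1 :: r1 :: rest).length / 4 = rest.length / 4 + 1 := by
      simp [List.length_cons]; omega
    rw [ih]
    unfold pvGroups
    rw [hlen, List.range_succ_eq_map, List.flatMap_cons, List.flatMap_map]
    have hshift : (List.range (rest.length / 4)).flatMap
          (fun k => pvGroup (l0 :: r0 :: l1 :: r1 :: rest) (Nat.succ k))
        = (List.range (rest.length / 4)).flatMap (pvGroup rest) := by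
      apply List.flatMap_congr
      intro k _
      exact pvGroup_shift l0 r0 l1 r1 rest k
    rw [hshift]
    simp [pvGroup, List.getD]
  | case2 x hx =>
    rcases x with _ | ⟨a, _ | ⟨b, _ | ⟨c, _ | ⟨d, t⟩⟩⟩⟩
    · simp [pvGroups]
    · simp [pvGroups]
    · simp [pvGroups]
    · simp [pvGroups]
    · exact (hx a b c d t rfl).elim

-- ===== VERDICT =====
theorem resample_data_spec : Claim_equal_resample_data := by
  intro data _
  unfold Spec_resample_data
  rw [pvA_eq_groups, pvB_eq_core, pvCore_eq_rec4, pvRec4_eq_groups]
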